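-- pv_equiv track=rewrite | github.com/etas-contrib/score_bazel-tools-cc | quality/private/clang_tidy/tools/clang_tidy_configs.py | reduce_checks
-- ===== SOURCE A (Python) =====
-- def reduce_checks(checks: set) -> set:
--     """Merges two equal checks, i.e. if one check is contained in the other one via wildcards."""
--     remove_checks = set()
--     for wildcard_check in checks:
--         if wildcard_check.endswith("*"):
--             for check in checks:
--                 if check.startswith(wildcard_check[:-1]) and check != wildcard_check:
--                     remove_checks.add(check)
--     return checks - remove_checks
-- ===== SOURCE B (Python) =====
-- def reduce_checks(checks: set) -> set:
--     """Merges two equal checks, i.e. if one check is contained in the other one via wildcards."""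
--     prefixes = {c[:-1] for c in checks if c.endswith("*")}
--     out = set()
--     for c in checks:
--         n = len(c)
--         covered = any(c[:k] in prefixes and not (c.endswith("*") and k == n - 1)
--                       for k in range(n + 1))
--         if not covered:
--             out.add(c)
--     return out
-- ===== Notes on version B (the rewrite author's own statement) =====
-- stated objective: alternative
-- what changed: Instead of the nested scan over all pairs (wildcard, check), B builds the set of wildcard prefixes once and tests, for each check, each of its own prefixes for membership in that set, so the inner scan over all checks disappears.
import Mathlib
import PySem

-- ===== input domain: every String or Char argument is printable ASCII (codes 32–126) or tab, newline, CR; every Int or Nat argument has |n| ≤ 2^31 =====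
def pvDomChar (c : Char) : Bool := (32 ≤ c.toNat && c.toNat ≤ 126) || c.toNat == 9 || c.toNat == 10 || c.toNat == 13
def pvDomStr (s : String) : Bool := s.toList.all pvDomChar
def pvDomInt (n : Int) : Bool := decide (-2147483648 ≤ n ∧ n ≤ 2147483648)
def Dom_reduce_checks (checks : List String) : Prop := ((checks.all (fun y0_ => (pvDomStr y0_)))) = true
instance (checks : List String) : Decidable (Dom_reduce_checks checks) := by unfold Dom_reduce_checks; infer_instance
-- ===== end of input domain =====

-- B replaces A's nested scan over all (wildcard, check) pairs by one wildcard-prefix set queried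
-- with each check's own prefixes (objective: alternative; the inner scan over all checks disappears).

-- ===== PORT A =====
def reduce_checks (checks : List String) : List String :=
  let remove_checks : PySem.Set String :=
    checks.foldl (fun r wildcard_check =>
      if PySem.Str.endswith wildcard_check "*" then
        checks.foldl (fun r check =>
          if PySem.Str.startswith check (PySem.Str.slice wildcard_check none (some (-1)))
              && check != wildcard_check
          then PySem.Set.add r check else r) r
      else r) PySem.Set.empty
  PySem.Set.diff checks remove_checks

-- ===== PORT B =====
def reduce_checks_alt (checks : List String) : List String :=
  let prefixes : PySem.Set String :=
    checks.foldl (fun s c =>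
      if PySem.Str.endswith c "*" then PySem.Set.add s (PySem.Str.slice c none (some (-1))) else s)
      PySem.Set.empty
  checks.foldl (fun out c =>
    if (PySem.List.pyRange 0 (PySem.Str.len c + 1) 1).any (fun k =>
          PySem.Set.contains prefixes (PySem.Str.slice c none (some k))
          && !(PySem.Str.endswith c "*" && k == PySem.Str.len c - 1))
    then out else PySem.Set.add out c) PySem.Set.empty

-- ===== PRECONDITION & SPEC =====
-- The Python parameter is a set; the List String models its distinct elements, so Pre_ excludes
-- only lists with duplicate strings, which represent no Python input of A.
def Pre_reduce_checks (checks : List String) : Prop := checks.Nodup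
instance (checks : List String) : Decidable (Pre_reduce_checks checks) := by
  unfold Pre_reduce_checks; infer_instance
def pvWitness_reduce_checks : List String := ["a*", "ab", "cde"]
def Spec_reduce_checks (checks : List String) (out : List String) : Prop := out = reduce_checks_alt checks
instance (checks : List String) (out : List String) : Decidable (Spec_reduce_checks checks out) := by
  unfold Spec_reduce_checks; infer_instance

-- ===== CLAIM (what is proved, stated in full; the proofs are below) =====
def Claim_equal_reduce_checks : Prop := ∀ (checks : List String), Dom_reduce_checks checks → Pre_reduce_checks checks → Spec_reduce_checks checks (reduce_checks checks)

-- ===== LEMMAS AND PROOFS =====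

theorem str_eq_iff_toList (s t : String) : s = t ↔ s.toList = t.toList := by
  constructor
  · intro h; rw [h]
  · intro h; exact String.toList_injective h

-- membership in an inner "add if condition" loop
theorem mem_foldl_add_if (l : List String) (s : PySem.Set String) (p : String → Bool) (x : String) :
    x ∈ l.foldl (fun s c => if p c then PySem.Set.add s c else s) s ↔
      x ∈ s ∨ (x ∈ l ∧ p x = true) := by
  induction l generalizing s with
  | nil => simp
  | cons a l ih =>
    rw [List.foldl_cons]
    by_cases hp : p a = true
    · rw [if_pos hp, ih]
      simp only [PySem.Set.mem_add, List.mem_cons]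
      constructor
      · rintro (⟨h | rfl⟩ | ⟨h1, h2⟩)
        · exact Or.inl h
        · exact Or.inr ⟨Or.inl rfl, hp⟩
        · exact Or.inr ⟨Or.inr h1, h2⟩
      · rintro (h | ⟨(rfl | h1), h2⟩)
        · exact Or.inl (Or.inl h)
        · exact Or.inl (Or.inr rfl)
        · exact Or.inr ⟨h1, h2⟩
    · rw [if_neg hp, ih]
      simp only [List.mem_cons]
      constructor
      · rintro (h | ⟨h1, h2⟩)
        · exact Or.inl h
        · exact Or.inr ⟨Or.inr h1, h2⟩
      · rintro (h | ⟨(rfl | h1), h2⟩)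
        · exact Or.inl h
        · exact absurd h2 hp
        · exact Or.inr ⟨h1, h2⟩

-- membership in A's remove_checks loop
theorem mem_remove_loop (l m : List String) (s : PySem.Set String)
    (e : String → Bool) (p : String → String → Bool) (x : String) :
    x ∈ l.foldl (fun r w =>
        if e w then m.foldl (fun r c => if p w c then PySem.Set.add r c else r) r else r) s ↔
      x ∈ s ∨ ∃ w ∈ l, e w = true ∧ x ∈ m ∧ p w x = true := by
  induction l generalizing s with
  | nil => simp
  | cons a l ih =>
    rw [List.foldl_cons]
    by_cases he : e a = true
    · rw [if_pos he, ih, mem_foldl_add_if]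
      constructor
      · rintro ((h | ⟨h1, h2⟩) | ⟨w, hw, h3, h4, h5⟩)
        · exact Or.inl h
        · exact Or.inr ⟨a, List.mem_cons_self, he, h1, h2⟩
        · exact Or.inr ⟨w, List.mem_cons_of_mem _ hw, h3, h4, h5⟩
      · rintro (h | ⟨w, hw, h3, h4, h5⟩)
        · exact Or.inl (Or.inl h)
        · rcases List.mem_cons.mp hw with rfl | hw
          · exact Or.inl (Or.inr ⟨h4, h5⟩)
          · exact Or.inr ⟨w, hw, h3, h4, h5⟩
    · rw [if_neg he, ih]
      constructor
      · rintro (h | ⟨w, hw, h3, h4, h5⟩)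
        · exact Or.inl h
        · exact Or.inr ⟨w, List.mem_cons_of_mem _ hw, h3, h4, h5⟩
      · rintro (h | ⟨w, hw, h3, h4, h5⟩)
        · exact Or.inl h
        · rcases List.mem_cons.mp hw with rfl | hw
          · exact absurd h3 he
          · exact Or.inr ⟨w, hw, h3, h4, h5⟩

-- membership in B's prefixes loop
theorem mem_prefixes_loop (l : List String) (s : PySem.Set String)
    (e : String → Bool) (f : String → String) (x : String) :
    x ∈ l.foldl (fun s c => if e c then PySem.Set.add s (f c) else s) s ↔
      x ∈ s ∨ ∃ w ∈ l, e w = true ∧ x = f w := by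
  induction l generalizing s with
  | nil => simp
  | cons a l ih =>
    rw [List.foldl_cons]
    by_cases he : e a = true
    · rw [if_pos he, ih]
      simp only [PySem.Set.mem_add]
      constructor
      · rintro ((h | rfl) | ⟨w, hw, h3, h4⟩)
        · exact Or.inl h
        · exact Or.inr ⟨a, List.mem_cons_self, he, rfl⟩
        · exact Or.inr ⟨w, List.mem_cons_of_mem _ hw, h3, h4⟩
      · rintro (h | ⟨w, hw, h3, h4⟩)
        · exact Or.inl (Or.inl h)
        · rcases List.mem_cons.mp hw with rfl | hw
          · exact Or.inl (Or.inr h4)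
          · exact Or.inr ⟨w, hw, h3, h4⟩
    · rw [if_neg he, ih]
      constructor
      · rintro (h | ⟨w, hw, h3, h4⟩)
        · exact Or.inl h
        · exact Or.inr ⟨w, List.mem_cons_of_mem _ hw, h3, h4⟩
      · rintro (h | ⟨w, hw, h3, h4⟩)
        · exact Or.inl h
        · rcases List.mem_cons.mp hw with rfl | hw
          · exact absurd h3 he
          · exact Or.inr ⟨w, hw, h3, h4⟩

-- B's output loop is a filter when the input list has no duplicates
theorem foldl_add_if_not_eq_filter (l : List String) (q : String → Bool) (s : PySem.Set String)
    (hnd : l.Nodup) (hdisj : ∀ x ∈ l, x ∉ s) :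
    l.foldl (fun out c => if q c then out else PySem.Set.add out c) s =
      s ++ l.filter (fun c => !q c) := by
  induction l generalizing s with
  | nil => simp
  | cons a l ih =>
    rcases List.nodup_cons.mp hnd with ⟨ha, hnd'⟩
    rw [List.foldl_cons, List.filter_cons]
    by_cases hq : q a = true
    · rw [if_pos hq, if_neg (by simp [hq] : ¬((!q a) = true))]
      exact ih s hnd' (fun x hx => hdisj x (List.mem_cons_of_mem _ hx))
    · have hna : a ∉ s := hdisj a List.mem_cons_self
      rw [if_neg hq, if_pos (by simp [hq] : (!q a) = true),
        PySem.Set.add_of_not_mem hna, ih (s ++ [a]) hnd' ?_]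
      · simp
      · intro x hx
        simp only [List.mem_append, List.mem_singleton]
        rintro (h | rfl)
        · exact hdisj x (List.mem_cons_of_mem _ hx) h
        · exact ha hx

-- the core per-element equivalence, on lists of characters via suffix/prefix facts
theorem covered_iff (checks : List String) (c : String) :
    (∃ w ∈ checks, PySem.Chars.endswith w.toList ['*'] = true ∧
        w.toList.dropLast <+: c.toList ∧ c ≠ w) ↔
      (∃ k : Nat, k < c.toList.length + 1 ∧
        (∃ w ∈ checks, PySem.Chars.endswith w.toList ['*'] = true ∧
            c.toList.take k = w.toList.dropLast) ∧
        ¬(PySem.Chars.endswith c.toList ['*'] = true ∧ k = c.toList.length - 1)) := by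
  constructor
  · rintro ⟨w, hw, hws, hpre, hne⟩
    refine ⟨w.toList.dropLast.length, ?_, ⟨w, hw, hws, ?_⟩, ?_⟩
    · have := hpre.length_le; omega
    · exact (List.prefix_iff_eq_take.mp hpre).symm
    · rintro ⟨hce, hk⟩
      apply hne
      rw [str_eq_iff_toList]
      rcases (PySem.Chars.endswith_iff _ _).mp hws with ⟨tw, htw⟩
      rcases (PySem.Chars.endswith_iff _ _).mp hce with ⟨tc, htc⟩
      have hwlen : w.toList.length = w.toList.dropLast.length + 1 := by
        have hne' : w.toList ≠ [] := by
          intro h; rw [h] at htw; simpa using congrArg List.length htw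
        have hpos : 0 < w.toList.length := List.length_pos_iff.mpr hne'
        rw [List.length_dropLast]
        omega
      have hclen : c.toList.length = w.toList.dropLast.length + 1 := by
        have hne' : c.toList ≠ [] := by
          intro h; rw [h] at htc; simpa using congrArg List.length htc
        have hpos : 0 < c.toList.length := List.length_pos_iff.mpr hne'
        omega
      have hcd : c.toList.dropLast = w.toList.dropLast := by
        rw [List.dropLast_eq_take, hclen]
        simpa using (List.prefix_iff_eq_take.mp hpre).symm
      have hwlast : w.toList = w.toList.dropLast ++ ['*'] := by
        conv_lhs => rw [← htw]
        have h5 : w.toList.dropLast = tw := by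
          have := congrArg List.dropLast htw.symm
          simpa using this
        rw [← h5]
      have hclast : c.toList = c.toList.dropLast ++ ['*'] := by
        conv_lhs => rw [← htc]
        have h5 : c.toList.dropLast = tc := by
          have := congrArg List.dropLast htc.symm
          simpa using this
        rw [← h5]
      rw [hclast, hcd, ← hwlast]
  · rintro ⟨k, hk, ⟨w, hw, hws, htake⟩, hnot⟩
    refine ⟨w, hw, hws, ?_, ?_⟩
    · rw [← htake]; exact List.take_prefix _ _
    · rintro rfl
      apply hnot
      refine ⟨hws, ?_⟩
      have h1 : (c.toList.take k).length = k := by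
        rw [List.length_take]; omega
      have h2 : (c.toList.take k).length = c.toList.length - 1 := by
        rw [htake, List.length_dropLast]
      omega

-- A's removal condition, as a boolean predicate over a single element
theorem remove_contains (checks : List String) (c : String) :
    (PySem.Set.contains
      (checks.foldl (fun r w =>
        if PySem.Str.endswith w "*" then
          checks.foldl (fun r x =>
            if PySem.Str.startswith x (PySem.Str.slice w none (some (-1))) && x != w
            then PySem.Set.add r x else r) r
        else r) PySem.Set.empty) c = true) ↔
      (c ∈ checks ∧ ∃ w ∈ checks, PySem.Chars.endswith w.toList ['*'] = true ∧
        w.toList.dropLast <+: c.toList ∧ c ≠ w) := by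
  rw [PySem.Set.contains_iff, mem_remove_loop]
  constructor
  · rintro (h | ⟨w, hw, h1, h2, h3⟩)
    · simp [PySem.Set.empty] at h
    · have h45 : PySem.Str.startswith c (PySem.Str.slice w none (some (-1))) = true ∧
          (c != w) = true := by simpa using h3
      refine ⟨h2, w, hw, ?_, ?_, ?_⟩
      · rw [PySem.Str.endswith_eq] at h1; simpa using h1
      · have h4 := h45.1
        rw [PySem.Str.startswith_eq, PySem.Chars.startswith_iff] at h4
        rwa [PySem.Str.slice_to_neg_one] at h4
      · intro hh; rw [hh] at h45; simpa using h45.2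
  · rintro ⟨hc, w, hw, h1, h2, h3⟩
    refine Or.inr ⟨w, hw, ?_, hc, ?_⟩
    · rw [PySem.Str.endswith_eq]; simpa using h1
    · simp only [Bool.and_eq_true]
      constructor
      · rw [PySem.Str.startswith_eq, PySem.Chars.startswith_iff, PySem.Str.slice_to_neg_one]
        exact h2
      · simpa using h3

-- B's covered condition, as the boolean any over the integer range
theorem covered_any (checks : List String) (c : String) :
    ((PySem.List.pyRange 0 (PySem.Str.len c + 1) 1).any (fun k =>
        PySem.Set.contains
          (checks.foldl (fun s x =>
            if PySem.Str.endswith x "*" then PySem.Set.add s (PySem.Str.slice x none (some (-1)))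
            else s) PySem.Set.empty) (PySem.Str.slice c none (some k))
        && !(PySem.Str.endswith c "*" && k == PySem.Str.len c - 1)) = true) ↔
      (∃ k : Nat, k < c.toList.length + 1 ∧
        (∃ w ∈ checks, PySem.Chars.endswith w.toList ['*'] = true ∧
            c.toList.take k = w.toList.dropLast) ∧
        ¬(PySem.Chars.endswith c.toList ['*'] = true ∧ k = c.toList.length - 1)) := by
  rw [List.any_eq_true]
  have hlen : PySem.Str.len c = (c.toList.length : Int) := by
    simp [PySem.Str.len_eq]
  constructor
  · rintro ⟨k, hkmem, hcond⟩
    rw [PySem.List.mem_pyRange_one] at hkmem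
    obtain ⟨kn, rfl⟩ : ∃ kn : Nat, k = (kn : Int) := ⟨k.toNat, by omega⟩
    rw [Bool.and_eq_true] at hcond
    obtain ⟨h1, h2⟩ := hcond
    rw [PySem.Set.contains_iff, mem_prefixes_loop] at h1
    rcases h1 with h1 | ⟨w, hw, he, heq⟩
    · simp [PySem.Set.empty] at h1
    rw [hlen] at hkmem
    refine ⟨kn, by omega, ⟨w, hw, ?_, ?_⟩, ?_⟩
    · rw [PySem.Str.endswith_eq] at he; simpa using he
    · have hq := congrArg String.toList heq
      rw [PySem.Str.toList_slice, PySem.Chars.slice_eq_listSlice,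
        PySem.List.slice_to_natCast, PySem.Str.slice_to_neg_one] at hq
      exact hq
    · rintro ⟨hce, hkk⟩
      have hP : PySem.Str.endswith c "*" = true := by
        rw [PySem.Str.endswith_eq]; simpa using hce
      have hcne2 : c.toList ≠ [] := by
        rcases (PySem.Chars.endswith_iff _ _).mp hce with ⟨t, ht⟩
        intro h; rw [h] at ht; simpa using congrArg List.length ht
      have hpos2 : 0 < c.toList.length := List.length_pos_iff.mpr hcne2
      have hQ : ((kn : Int) == PySem.Str.len c - 1) = true := by
        rw [beq_iff_eq, hlen]; omega
      rw [hP, hQ] at h2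
      simp at h2
  · rintro ⟨k, hk, ⟨w, hw, he, heq⟩, hnot⟩
    refine ⟨(k : Int), ?_, ?_⟩
    · rw [PySem.List.mem_pyRange_one, hlen]; omega
    simp only [Bool.and_eq_true]
    constructor
    · rw [PySem.Set.contains_iff, mem_prefixes_loop]
      refine Or.inr ⟨w, hw, ?_, ?_⟩
      · rw [PySem.Str.endswith_eq]; simpa using he
      · rw [str_eq_iff_toList, PySem.Str.toList_slice, PySem.Chars.slice_eq_listSlice,
          PySem.List.slice_to_natCast, PySem.Str.slice_to_neg_one]
        exact heq
    · by_cases hce : PySem.Chars.endswith c.toList ['*'] = true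
      · have hQ : ((k : Int) == PySem.Str.len c - 1) = false := by
          rw [beq_eq_false_iff_ne, hlen]
          intro hkk
          have hcne : c.toList ≠ [] := by
            rcases (PySem.Chars.endswith_iff _ _).mp hce with ⟨t, ht⟩
            intro h; rw [h] at ht; simpa using congrArg List.length ht
          have : c.toList.length ≠ 0 := by
            intro h; exact hcne (List.length_eq_zero_iff.mp h)
          exact hnot ⟨hce, by omega⟩
        rw [hQ]; simp
      · have hP : PySem.Str.endswith c "*" = false := by
          rw [PySem.Str.endswith_eq]
          simpa using (Bool.not_eq_true _).mp (by simpa using hce)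
        rw [hP]; simp

-- ===== VERDICT (by name: the statement is the Claim_ definition above) =====
theorem reduce_checks_spec : Claim_equal_reduce_checks := by
  intro checks _ hpre
  unfold Spec_reduce_checks
  show reduce_checks checks = reduce_checks_alt checks
  simp only [reduce_checks, reduce_checks_alt]
  rw [foldl_add_if_not_eq_filter _ _ _ hpre (by simp [PySem.Set.empty])]
  simp only [PySem.Set.empty, List.nil_append, PySem.Set.diff]
  apply List.filter_congr
  intro c hc
  have hAB := Bool.eq_iff_iff.mpr
    ((remove_contains checks c).trans
      (((and_iff_right hc).trans (covered_iff checks c)).trans (covered_any checks c).symm))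
  exact congrArg (fun b => !b) hAB
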